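-- pv_equiv track=rewrite | github.com/Fruitful-Network-Development/mycite-core | portals/_shared/portal/application/time_address_schema.py | _read_unary_width
-- ===== SOURCE A (Python) =====
-- def _read_unary_width(bits: str, pos: int) -> tuple[int, int]:
--     zeros = 0
--     while pos < len(bits) and bits[pos] == "0":
--         zeros += 1
--         pos += 1
--     if pos >= len(bits) or bits[pos] != "1":
--         raise ValueError("invalid unary-width segment")
--     pos += 1
--     return zeros, pos
-- ===== SOURCE B (Python) =====
-- def _read_unary_width(bits: str, pos: int) -> tuple[int, int]:
--     idx = bits.find("1", pos)
--     if idx == -1: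
--         raise ValueError("invalid unary-width segment")
--     segment = bits[pos:idx]
--     if any(c != "0" for c in segment):
--         raise ValueError("invalid unary-width segment")
--     return idx - pos, idx + 1
-- ===== Notes on version B (the rewrite author's own statement) =====
-- stated objective: simpler
-- what changed: Replaces A's incremental leading-zero counting loop with a locate-then-verify decomposition: str.find locates the terminating '1' (handling missing-terminator and pos-past-end uniformly), a slice check verifies the skipped region is all zeros, and the zero count is the arithmetic difference idx - pos.
-- outside the precondition, e.g. on _read_unary_width('001', -3): A returns (2, 0), B returns (5, 3); on _read_unary_width('100', -2): A returns (2, 1), B raises ValueError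
import Mathlib
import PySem

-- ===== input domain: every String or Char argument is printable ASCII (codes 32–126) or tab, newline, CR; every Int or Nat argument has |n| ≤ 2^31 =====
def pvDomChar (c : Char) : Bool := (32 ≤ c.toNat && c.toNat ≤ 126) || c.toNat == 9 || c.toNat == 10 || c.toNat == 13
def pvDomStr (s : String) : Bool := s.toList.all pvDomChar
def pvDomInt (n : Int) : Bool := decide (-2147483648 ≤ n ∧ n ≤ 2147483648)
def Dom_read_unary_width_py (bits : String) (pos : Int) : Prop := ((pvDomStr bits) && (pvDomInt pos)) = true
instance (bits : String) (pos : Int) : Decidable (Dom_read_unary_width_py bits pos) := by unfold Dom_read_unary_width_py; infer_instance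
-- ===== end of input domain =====

-- B replaces A's incremental zero-counting loop with locate-the-'1'-then-verify-the-slice (simpler decomposition, same cost).

-- ===== PORT A =====
-- the while loop: returns the final (zeros, pos) state
def readA_loop (cs : List Char) (pos zeros : Int) : Int × Int :=
  if h : pos < (cs.length : Int) ∧ PySem.List.pyGet? cs pos = some '0' then
    readA_loop cs (pos + 1) (zeros + 1)
  else (zeros, pos)
termination_by ((cs.length : Int) - pos).toNat
decreasing_by obtain ⟨h1, -⟩ := h; omega

def read_unary_width_py (bits : String) (pos : Int) : Int × Int :=
  let cs := bits.toList          -- indexing/len ported on the list side (exact)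
  let r := readA_loop cs pos 0
  if (cs.length : Int) ≤ r.2 ∨ PySem.List.pyGet? cs r.2 ≠ some '1' then (0, 0)  -- raise ValueError/IndexError: excluded by Pre_
  else (r.1, r.2 + 1)

-- ===== PORT B =====
def read_unary_width_py_alt (bits : String) (pos : Int) : Int × Int :=
  let idx := PySem.Str.findFrom bits "1" pos none   -- bits.find("1", pos)
  if idx = -1 then (0, 0)                           -- raise ValueError: excluded by Pre_
  else
    let seg := PySem.List.slice bits.toList (some pos) (some idx)  -- bits[pos:idx], ported on the list side (exact)
    if seg.any (fun c => c ≠ '0') then (0, 0)       -- raise ValueError: excluded by Pre_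
    else (idx - pos, idx + 1)

-- ===== PRECONDITION & SPEC =====
-- Pre_ excludes (a) inputs whose suffix at pos is not '0'*k followed by '1', on which A raises
-- ValueError (or IndexError for pos < -len(bits)), and (b) negative pos — outside the natural
-- stream-cursor domain, where A's returned value is an artefact of Python's negative-index wraparound.
def Pre_read_unary_width_py (bits : String) (pos : Int) : Prop :=
  0 ≤ pos ∧ ((bits.toList.drop pos.toNat).dropWhile (· = '0')).head? = some '1'
instance (bits : String) (pos : Int) : Decidable (Pre_read_unary_width_py bits pos) := by
  unfold Pre_read_unary_width_py; infer_instance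

def pvWitness_read_unary_width_py : String × Int := ("001", 0)

def Spec_read_unary_width_py (bits : String) (pos : Int) (out : Int × Int) : Prop := out = read_unary_width_py_alt bits pos
instance (bits : String) (pos : Int) (out : Int × Int) : Decidable (Spec_read_unary_width_py bits pos out) := by unfold Spec_read_unary_width_py; infer_instance

-- ===== CLAIM (what is proved, stated in full; the proofs are below) =====
def Claim_equal_read_unary_width_py : Prop := ∀ (bits : String) (pos : Int), Dom_read_unary_width_py bits pos → Pre_read_unary_width_py bits pos → Spec_read_unary_width_py bits pos (read_unary_width_py bits pos)

-- ===== LEMMAS AND PROOFS =====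

-- A's loop, under the valid-suffix shape, adds the leading-zero count to both components
theorem readA_loop_eq (cs : List Char) (pos zeros : Int) (hpos : 0 ≤ pos)
    (h : ((cs.drop pos.toNat).dropWhile (· = '0')).head? = some '1') :
    readA_loop cs pos zeros =
      (zeros + (((cs.drop pos.toNat).takeWhile (· = '0')).length : Int),
       pos + (((cs.drop pos.toNat).takeWhile (· = '0')).length : Int)) := by
  rw [readA_loop]
  by_cases hc : pos < (cs.length : Int) ∧ PySem.List.pyGet? cs pos = some '0'
  · rw [dif_pos hc]
    obtain ⟨h1, h2⟩ := hc
    have hk : pos.toNat < cs.length := by omega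
    have hcast : ((pos.toNat : Nat) : Int) = pos := Int.toNat_of_nonneg hpos
    have hget : cs[pos.toNat]? = some '0' := by
      rw [← hcast, PySem.List.pyGet?_natCast] at h2; exact h2
    have hdrop : cs.drop pos.toNat = '0' :: cs.drop (pos.toNat + 1) := by
      rw [List.drop_eq_getElem_cons hk]
      have : cs[pos.toNat] = '0' := by
        have := List.getElem?_eq_getElem hk
        rw [this] at hget; exact Option.some.inj hget
      rw [this]
    have hn1 : (pos + 1).toNat = pos.toNat + 1 := by omega
    have h' : ((cs.drop (pos + 1).toNat).dropWhile (· = '0')).head? = some '1' := by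
      rw [hn1]
      rw [hdrop] at h
      simpa using h
    rw [readA_loop_eq cs (pos + 1) (zeros + 1) (by omega) h']
    rw [hn1, hdrop]
    simp only [List.takeWhile_cons]
    norm_num
    constructor <;> ring
  · rw [dif_neg hc]
    by_cases hlt : pos < (cs.length : Int)
    · have h2 : ¬ PySem.List.pyGet? cs pos = some '0' := fun hx => hc ⟨hlt, hx⟩
      have hk : pos.toNat < cs.length := by omega
      have hcast : ((pos.toNat : Nat) : Int) = pos := Int.toNat_of_nonneg hpos
      have hget : cs[pos.toNat]? = some cs[pos.toNat] := List.getElem?_eq_getElem hk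
      have hne : cs[pos.toNat] ≠ '0' := by
        intro hx
        apply h2
        rw [← hcast, PySem.List.pyGet?_natCast, hget, hx]
      have hdrop : cs.drop pos.toNat = cs[pos.toNat] :: cs.drop (pos.toNat + 1) :=
        List.drop_eq_getElem_cons hk
      rw [hdrop]
      simp [hne]
    · exfalso
      have : cs.drop pos.toNat = [] := List.drop_eq_nil_of_le (by omega)
      rw [this] at h
      simp at h
  termination_by ((cs.length : Int) - pos).toNat
  decreasing_by omega

-- ===== VERDICT (by name: the statement is the Claim_ definition above) =====
theorem read_unary_width_py_spec : Claim_equal_read_unary_width_py := by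
  intro bits pos hdom hpre
  obtain ⟨hpos, hsuf⟩ := hpre
  simp only [Spec_read_unary_width_py, read_unary_width_py, read_unary_width_py_alt]
  set cs := bits.toList with hcs
  set k := pos.toNat with hkdef
  have hcast : ((k : Nat) : Int) = pos := Int.toNat_of_nonneg hpos
  set l := cs.drop k with hl
  set z := (l.takeWhile (· = '0')).length with hz
  obtain ⟨rest, hrest⟩ : ∃ rest, l.dropWhile (· = '0') = '1' :: rest := by
    cases hd : l.dropWhile (· = '0') with
    | nil => rw [hd] at hsuf; simp at hsuf
    | cons a r =>
      rw [hd] at hsuf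
      simp at hsuf
      exact ⟨r, by rw [hsuf]⟩
  have hsplit : l = l.takeWhile (· = '0') ++ '1' :: rest := by
    rw [← hrest]; exact (List.takeWhile_append_dropWhile).symm
  have hlenl : l.length = z + rest.length + 1 := by
    conv_lhs => rw [hsplit]
    rw [List.length_append, List.length_cons, ← hz]
    omega
  have hlen : k + z ≤ cs.length := by
    have : z ≤ l.length := by omega
    have hll : l.length = cs.length - k := by rw [hl]; simp
    have hk' : k ≤ cs.length := by
      by_cases hkk : k ≤ cs.length
      · exact hkk
      · rw [hl] at hsplit
        rw [List.drop_eq_nil_of_le (by omega)] at hsplit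
        simp at hsplit
    omega
  have hdropz : l.drop z = '1' :: rest := by
    conv_lhs => rw [hsplit]
    rw [hz, List.drop_left]
  have hklt : k + z < cs.length := by
    have : l.length = cs.length - k := by rw [hl]; simp
    have : (l.drop z).length = l.length - z := by simp
    rw [hdropz] at this
    simp at this
    omega
  have hgetkz : cs[(k + z)]? = some '1' := by
    rw [← List.head?_drop, ← List.drop_drop, ← hl, hdropz]
    rfl
  -- A side
  rw [readA_loop_eq cs pos 0 hpos hsuf]
  rw [← hl, ← hz]
  have hposz : pos + (z : Int) = ((k + z : Nat) : Int) := by omega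
  have hgetA : PySem.List.pyGet? cs (pos + (z : Int)) = some '1' := by
    rw [hposz, PySem.List.pyGet?_natCast, hgetkz]
  have hcondA : ¬ ((cs.length : Int) ≤ (0 + (z:Int), pos + (z:Int)).2 ∨
      PySem.List.pyGet? cs (0 + (z:Int), pos + (z:Int)).2 ≠ some '1') := by
    push Not
    exact ⟨by simp; omega, by simpa using hgetA⟩
  rw [if_neg hcondA]
  -- B side
  have hfindrom : PySem.Str.findFrom bits "1" pos none = ((k + z : Nat) : Int) := by
    have h1l : ("1" : String).toList = ['1'] := rfl
    rw [PySem.Str.findFrom_eq, h1l, ← hcs, ← hcast]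
    rw [PySem.Chars.findFrom_natCast cs ['1'] k (by omega)]
    have hinfix : ['1'] <:+: cs.drop k := by
      rw [← hl, hsplit]
      exact ⟨l.takeWhile (· = '0'), rest, by simp⟩
    have hne0 : PySem.Chars.findFrom (cs.drop k) ['1'] ((0 : Nat) : Int) none ≠ -1 := by
      intro hEq
      rw [PySem.Chars.findFrom_natCast_eq_neg_one_iff (cs.drop k) ['1'] 0 (by omega)] at hEq
      exact hEq (by simpa using hinfix)
    obtain ⟨hge, hpre', hmin⟩ := PySem.Chars.findFrom_natCast_spec (cs.drop k) ['1'] 0 (by omega) hne0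
    set f := PySem.Chars.findFrom (cs.drop k) ['1'] ((0 : Nat) : Int) none with hf
    have hfz : f.toNat = z := by
      have hnotlt : ¬ z < f.toNat := by
        intro hzlt
        apply hmin z (by omega) hzlt
        rw [← hl, hdropz]
        exact ⟨rest, rfl⟩
      have hnotgt : ¬ f.toNat < z := by
        intro hflt
        obtain ⟨t, ht⟩ := hpre'
        have hfl : f.toNat < l.length := by omega
        have hhead : ((cs.drop k).drop f.toNat).head? = some '1' := by rw [← ht]; rfl
        rw [← hl, List.head?_drop, List.getElem?_eq_getElem hfl] at hhead
        have h1 : l[f.toNat] = '1' := Option.some.inj hhead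
        have hpref : (l.takeWhile (· = '0'))[f.toNat]? = l[f.toNat]? := by
          conv_rhs => rw [hsplit]
          rw [List.getElem?_append_left (by omega)]
        have hmem : l[f.toNat] ∈ l.takeWhile (· = '0') := by
          apply List.mem_of_getElem?
          rw [hpref, List.getElem?_eq_getElem hfl]
        have h0 : l[f.toNat] = '0' := by simpa using List.mem_takeWhile_imp hmem
        rw [h1] at h0
        exact absurd h0 (by decide)
      omega
    have hfval : f = (z : Int) := by omega
    rw [← PySem.Chars.findFrom_zero]
    push_cast at hf ⊢
    rw [← hf, hfval]
    rw [if_neg (by omega : ¬ ((z : Int) = -1))]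
  rw [hfindrom]
  have hneg1 : ¬ (((k + z : Nat) : Int) = -1) := by omega
  rw [if_neg hneg1]
  have hslice : PySem.List.slice cs (some pos) (some ((k + z : Nat) : Int)) = l.takeWhile (· = '0') := by
    rw [← hcast, PySem.List.slice_natCast]
    have : k + z - k = z := by omega
    rw [this]
    conv_lhs => rw [← hl, hsplit]
    rw [hz, List.take_left]
  rw [hslice]
  have hany : (l.takeWhile (· = '0')).any (fun c => c ≠ '0') = false := by
    rw [List.any_eq_false]
    intro x hx
    have := List.mem_takeWhile_imp hx
    simpa using this
  rw [hany]
  simp only [Bool.false_eq_true, if_false]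
  simp only [Prod.mk.injEq]
  constructor <;> omega
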